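-- pv_equiv track=rewrite | github.com/JAKUik/JobTasks | t01_recursion.py | search_all_paths
-- ===== SOURCE A (Python) =====
-- def search_all_paths(words, current_word=None, path=None):
--     """
--     Recursive function. Searches all chained lists
--     :param words: A set of words
--     :param current_word: Actual processed word
--     :param path: List of processed words
--     :return: All chained lists
--     """
--     if path is None:
--         path = []
--     if current_word:
--         path.append(current_word)
--     all_paths = []
--     for word in words:
--         if not current_word or word[0] == current_word[-1]:
--             remaining_words = words.copy()
--             remaining_words.remove(word)
--             new_paths = search_all_paths(remaining_words, word, path.copy())
--             all_paths.extend(new_paths)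
--     if not all_paths and current_word:
--         all_paths.append(path)
--     return all_paths
-- ===== SOURCE B (Python) =====
-- def search_all_paths(words, current_word=None, path=None):
--     """Iterative DFS with an explicit stack of (remaining, current, path) frames.
--     Return value only: unlike A, this does not mutate the caller's `path` list."""
--     base = list(path) if path is not None else []
--     if current_word:
--         base.append(current_word)
--     results = []
--     stack = [(list(words), current_word, base)]
--     while stack:
--         ws, cur, p = stack.pop()
--         if cur:
--             last = cur[-1]
--             cands = [w for w in ws if w[0] == last]
--         else:
--             cands = list(ws)
--         if not cands and cur:
--             results.append(p)
--         else:
--             for w in reversed(cands):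
--                 rest = list(ws)
--                 rest.remove(w)
--                 stack.append((rest, w, p + [w]))
--     return results
-- ===== Notes on version B (the rewrite author's own statement) =====
-- stated objective: alternative
-- what changed: Replaces the recursive tree search by an iterative DFS over an explicit stack of (remaining-words, current-word, path) frames, pushing children in reverse so results keep A's order; Pre_ excludes only inputs where both programs raise IndexError (an empty-string word reachable while a current word is set); B also does not mutate the caller's path list.
import Mathlib
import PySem

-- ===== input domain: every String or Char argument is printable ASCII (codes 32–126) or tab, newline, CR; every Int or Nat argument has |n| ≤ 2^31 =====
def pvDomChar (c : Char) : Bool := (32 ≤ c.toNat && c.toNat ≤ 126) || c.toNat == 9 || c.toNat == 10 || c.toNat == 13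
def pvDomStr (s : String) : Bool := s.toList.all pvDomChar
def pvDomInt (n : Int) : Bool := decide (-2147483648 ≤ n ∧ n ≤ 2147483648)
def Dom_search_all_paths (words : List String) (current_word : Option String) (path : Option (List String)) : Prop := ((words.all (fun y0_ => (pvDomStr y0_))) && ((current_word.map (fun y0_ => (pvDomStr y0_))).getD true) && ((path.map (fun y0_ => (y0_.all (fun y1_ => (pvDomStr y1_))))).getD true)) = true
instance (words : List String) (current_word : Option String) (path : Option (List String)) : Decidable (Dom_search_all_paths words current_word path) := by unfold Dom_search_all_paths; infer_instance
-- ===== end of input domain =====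

-- B replaces the recursion by an iterative DFS with an explicit stack (return value only:
-- A mutates the caller's `path` by appending current_word; B does not).

-- Python truthiness of an optional string: None and "" are falsy.
def pvTruthy : Option String → Bool
  | none => false
  | some s => !(s == "")

-- `word[0] == current_word[-1]` (only evaluated when current_word is truthy);
-- where Python raises IndexError (word = "") the PySem primitive is none and we yield false:
-- exactly those inputs are excluded by Pre_search_all_paths.
def pvMatch (word : String) (cur : Option String) : Bool :=
  match PySem.Str.pyGet? word 0, PySem.Str.pyGet? (cur.getD "") (-1) with
  | some a, some b => a == b
  | _, _ => false

-- ===== PORT A =====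
-- `remaining_words.remove(word)` removes the first occurrence of word; word ∈ words,
-- so ValueError is impossible and it is List.erase.
def search_all_paths (words : List String) (current_word : Option String) (path : Option (List String)) : List (List String) :=
  let path0 := path.getD []
  let path1 := if pvTruthy current_word then path0 ++ [current_word.getD ""] else path0
  let all_paths :=
    (words.attach.map (fun w =>
      if !pvTruthy current_word || pvMatch w.1 current_word then
        search_all_paths (words.erase w.1) (some w.1) (some path1)
      else [])).flatten
  if all_paths.isEmpty && pvTruthy current_word then [path1] else all_paths
termination_by words.length
decreasing_by
  have := List.length_erase_of_mem w.2
  have : 0 < words.length := List.length_pos_of_mem w.2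
  omega

-- ===== PORT B =====
-- Candidate words for a frame: all words whose first letter matches, or all words when no
-- current word (Python's `if cur: ... else cands = list(ws)`).
def pvCands (ws : List String) (cur : Option String) : List String :=
  if pvTruthy cur then ws.filter (fun w => pvMatch w cur) else ws

theorem pvCands_mem {ws : List String} {cur : Option String} {w : String}
    (h : w ∈ pvCands ws cur) : w ∈ ws := by
  unfold pvCands at h
  split_ifs at h
  · exact List.mem_of_mem_filter h
  · exact h

theorem pvCands_length_le (ws : List String) (cur : Option String) :
    (pvCands ws cur).length ≤ ws.length := by
  unfold pvCands
  split_ifs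
  · exact List.length_filter_le _ _
  · exact Nat.le_refl _

-- Termination measure bound for the DFS stack: the frames pushed for one popped frame
-- weigh strictly less than the popped frame's weight (n+1)!.
theorem pvSumChildren_lt (ws p : List String) (cur : Option String) :
    (((pvCands ws cur).map (fun w => (ws.erase w, some w, p ++ [w]))).map
      (fun f : List String × Option String × List String =>
        Nat.factorial (f.1.length + 1))).sum < Nat.factorial (ws.length + 1) := by
  have hsub : ∀ x ∈ (((pvCands ws cur).map (fun w => (ws.erase w, some w, p ++ [w]))).map
      (fun f : List String × Option String × List String =>
        Nat.factorial (f.1.length + 1))), x ≤ Nat.factorial ws.length := by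
    intro x hx
    rw [List.map_map] at hx
    obtain ⟨w, hw, rfl⟩ := List.mem_map.mp hx
    have hmem : w ∈ ws := pvCands_mem hw
    have h1 := List.length_erase_of_mem hmem
    have h2 : 0 < ws.length := List.length_pos_of_mem hmem
    have h3 : (ws.erase w).length + 1 = ws.length := by omega
    simp only [Function.comp]
    rw [h3]
  calc (((pvCands ws cur).map (fun w => (ws.erase w, some w, p ++ [w]))).map
          (fun f : List String × Option String × List String =>
            Nat.factorial (f.1.length + 1))).sum
      ≤ (((pvCands ws cur).map (fun w => (ws.erase w, some w, p ++ [w]))).map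
          (fun f : List String × Option String × List String =>
            Nat.factorial (f.1.length + 1))).length • Nat.factorial ws.length :=
        List.sum_le_card_nsmul _ _ hsub
    _ = (pvCands ws cur).length * Nat.factorial ws.length := by
        simp [smul_eq_mul]
    _ ≤ ws.length * Nat.factorial ws.length :=
        Nat.mul_le_mul_right _ (pvCands_length_le ws cur)
    _ < Nat.factorial (ws.length + 1) := by
        rw [Nat.factorial_succ]
        exact Nat.mul_lt_mul_of_lt_of_le (Nat.lt_succ_self _) (Nat.le_refl _)
          (Nat.factorial_pos ws.length)

-- Explicit DFS stack, top at the head; Python pushes the reversed candidate list onto the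
-- end of the stack, which with top-at-head is the candidate frames in forward order.
def pvAltRun (stack : List (List String × Option String × List String))
    (results : List (List String)) : List (List String) :=
  match stack with
  | [] => results
  | (ws, cur, p) :: rest =>
    if (pvCands ws cur).isEmpty && pvTruthy cur then
      pvAltRun rest (results ++ [p])
    else
      pvAltRun (((pvCands ws cur).map (fun w => (ws.erase w, some w, p ++ [w]))) ++ rest) results
termination_by (stack.map (fun f => Nat.factorial (f.1.length + 1))).sum
decreasing_by
  · simp only [List.map_cons, List.sum_cons]
    have := Nat.factorial_pos (ws.length + 1)
    omega
  · simp only [List.map_cons, List.sum_cons, List.map_append, List.sum_append]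
    have := pvSumChildren_lt ws p cur
    omega

def search_all_paths_alt (words : List String) (current_word : Option String) (path : Option (List String)) : List (List String) :=
  let base := path.getD []
  let base1 := if pvTruthy current_word then base ++ [current_word.getD ""] else base
  pvAltRun [(words, current_word, base1)] []

-- ===== PRECONDITION & SPEC =====
-- Pre_ excludes exactly the inputs on which the Python A raises IndexError (word[0] on an
-- empty-string word while a current word is set, at the top level or in a recursive call);
-- B raises there too, so nothing A returns on is excluded.
def Pre_search_all_paths (words : List String) (current_word : Option String) (_path : Option (List String)) : Prop :=
  ¬ ("" ∈ words ∧ (pvTruthy current_word = true ∨ ∃ w ∈ words, w ≠ ""))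
instance (words : List String) (current_word : Option String) (path : Option (List String)) : Decidable (Pre_search_all_paths words current_word path) := by unfold Pre_search_all_paths; infer_instance

def pvWitness_search_all_paths : List String × Option String × Option (List String) :=
  (["ab", "ba", "ac"], none, none)

def Spec_search_all_paths (words : List String) (current_word : Option String) (path : Option (List String)) (out : List (List String)) : Prop := out = search_all_paths_alt words current_word path
instance (words : List String) (current_word : Option String) (path : Option (List String)) (out : List (List String)) : Decidable (Spec_search_all_paths words current_word path out) := by unfold Spec_search_all_paths; infer_instance

-- ===== CLAIM (what is proved, stated in full; the proofs are below) =====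
def Claim_equal_search_all_paths : Prop := ∀ (words : List String) (current_word : Option String) (path : Option (List String)), Dom_search_all_paths words current_word path → Pre_search_all_paths words current_word path → Spec_search_all_paths words current_word path (search_all_paths words current_word path)

-- ===== LEMMAS AND PROOFS =====

-- path1 computed at entry: `if current_word: path.append(current_word)`.
def pvBase (cur : Option String) (path : Option (List String)) : List String :=
  if pvTruthy cur then (path.getD []) ++ [cur.getD ""] else path.getD []

-- A's recursion with the already-appended path passed explicitly (proof helper).
def pvCore (ws : List String) (cur : Option String) (p : List String) : List (List String) :=
  let all_paths :=
    (ws.attach.map (fun w =>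
      if !pvTruthy cur || pvMatch w.1 cur then
        pvCore (ws.erase w.1) (some w.1) (if pvTruthy (some w.1) then p ++ [w.1] else p)
      else [])).flatten
  if all_paths.isEmpty && pvTruthy cur then [p] else all_paths
termination_by ws.length
decreasing_by
  have := List.length_erase_of_mem w.2
  have : 0 < ws.length := List.length_pos_of_mem w.2
  omega

-- Per-frame soundness invariant: an empty-string word can only be present when the
-- current word is falsy and every word is empty (otherwise Python raises: outside Pre_).
def pvGood (ws : List String) (cur : Option String) : Prop :=
  "" ∈ ws → (pvTruthy cur = false ∧ ∀ w ∈ ws, w = "")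

theorem pvMatch_ne_empty {w : String} {cur : Option String} (h : pvMatch w cur = true) :
    w ≠ "" := by
  intro hw
  subst hw
  unfold pvMatch at h
  have h0 : PySem.Str.pyGet? "" 0 = none := by decide
  rw [h0] at h
  cases PySem.Str.pyGet? (cur.getD "") (-1) <;> simp at h

theorem pvIfEq {A B : List (List String)} (p : List String) (t : Bool) (h : A = B) :
    (if A.isEmpty && t then [p] else A) = (if B.isEmpty && t then [p] else B) := by
  rw [h]

theorem search_eq_core :
    ∀ (n : ℕ) (ws : List String), ws.length ≤ n → ∀ (cur : Option String) (path : Option (List String)),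
      search_all_paths ws cur path = pvCore ws cur (pvBase cur path) := by
  intro n
  induction n with
  | zero =>
    intro ws hws cur path
    have hnil : ws = [] := List.eq_nil_of_length_eq_zero (Nat.le_zero.mp hws)
    subst hnil
    rw [search_all_paths, pvCore]
    simp [pvBase]
  | succ m ih =>
    intro ws hws cur path
    rw [search_all_paths, pvCore]
    simp only [pvBase]
    apply pvIfEq
    apply congrArg List.flatten
    apply List.map_congr_left
    intro w hw
    split
    · have hlen : (ws.erase w.1).length ≤ m := by
        have := List.length_erase_of_mem w.2
        have := List.length_pos_of_mem w.2
        omega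
      rw [ih _ hlen (some w.1) (some _)]
      simp [pvBase]
    · rfl

theorem core_ne_nil {ws : List String} {cur : Option String} {p : List String}
    (h : pvTruthy cur = true) : pvCore ws cur p ≠ [] := by
  rw [pvCore]
  simp only [h, Bool.and_true]
  split
  · simp
  · rename_i hne
    simp only [List.isEmpty_iff] at hne
    exact hne

-- A subtree whose words are all empty under a falsy current word yields no paths,
-- independently of the accumulated path.
theorem core_all_empty :
    ∀ (n : ℕ) (ws : List String), ws.length ≤ n → ∀ (cur : Option String) (p : List String),
      (∀ w ∈ ws, w = "") → pvTruthy cur = false → pvCore ws cur p = [] := by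
  intro n
  induction n with
  | zero =>
    intro ws hws cur p _ hcur
    have hnil : ws = [] := List.eq_nil_of_length_eq_zero (Nat.le_zero.mp hws)
    subst hnil
    rw [pvCore]
    simp [hcur]
  | succ m ih =>
    intro ws hws cur p hemp hcur
    rw [pvCore]
    simp only [hcur, Bool.and_false]
    apply List.flatten_eq_nil_iff.mpr
    intro l hl
    obtain ⟨w, hw, rfl⟩ := List.mem_map.mp hl
    split
    · have hw' : w.1 = "" := hemp _ w.2
      have hlen : (ws.erase w.1).length ≤ m := by
        have := List.length_erase_of_mem w.2
        have := List.length_pos_of_mem w.2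
        omega
      apply ih _ hlen
      · intro x hx
        exact hemp _ (List.mem_of_mem_erase hx)
      · rw [hw']
        simp [pvTruthy]
    · rfl

theorem attach_map_eq (l : List String) (f : String → List (List String)) :
    l.attach.map (fun w => f w.1) = l.map f := by
  simp

theorem flatten_if_filter (ws : List String) (c : String → Bool)
    (g : String → List (List String)) :
    ((ws.attach.map (fun w => if c w.1 then g w.1 else [])).flatten)
      = ((ws.filter c).map g).flatten := by
  rw [attach_map_eq ws (fun w => if c w then g w else [])]
  induction ws with
  | nil => simp
  | cons x xs ih =>
    simp only [List.map_cons, List.flatten_cons, List.filter_cons]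
    by_cases hx : c x = true
    · simp only [hx, if_true, List.map_cons, List.flatten_cons, ih]
    · simp only [hx, Bool.false_eq_true, if_false, List.nil_append, ih]

-- One unfolding of pvCore, rephrased as B's frame step, valid on good frames.
theorem core_step {ws : List String} {cur : Option String} {p : List String}
    (hg : pvGood ws cur) :
    pvCore ws cur p =
      if (pvCands ws cur).isEmpty && pvTruthy cur then [p]
      else ((pvCands ws cur).map (fun w => pvCore (ws.erase w) (some w) (p ++ [w]))).flatten := by
  have hflat : ∀ (c : String → Bool) (g : String → List (List String)),
      ((ws.attach.map (fun w => if c w.1 then g w.1 else [])).flatten)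
        = ((ws.filter c).map g).flatten := flatten_if_filter ws
  by_cases ht : pvTruthy cur = true
  · rw [pvCore]
    simp only [ht, Bool.not_true, Bool.false_or, Bool.and_true]
    rw [hflat (fun w => pvMatch w cur)
        (fun w => pvCore (ws.erase w) (some w) (if pvTruthy (some w) then p ++ [w] else p))]
    have hcands : pvCands ws cur = ws.filter (fun w => pvMatch w cur) := by
      simp [pvCands, ht]
    have hmapeq : (ws.filter (fun w => pvMatch w cur)).map
          (fun w => pvCore (ws.erase w) (some w) (if pvTruthy (some w) then p ++ [w] else p))
        = (ws.filter (fun w => pvMatch w cur)).map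
          (fun w => pvCore (ws.erase w) (some w) (p ++ [w])) := by
      apply List.map_congr_left
      intro w hw
      have hne : w ≠ "" := pvMatch_ne_empty ((List.mem_filter.mp hw).2)
      have : pvTruthy (some w) = true := by
        simp [pvTruthy]
        exact hne
      rw [this]
      simp
    rw [hmapeq, ← hcands]
    by_cases hc : (pvCands ws cur).isEmpty = true
    · have : pvCands ws cur = [] := List.isEmpty_iff.mp hc
      simp [this]
    · have hne : pvCands ws cur ≠ [] := fun h => hc (by simp [h])
      obtain ⟨w0, ws0, hcons⟩ := List.exists_cons_of_ne_nil hne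
      have hflat_ne : (((pvCands ws cur).map
          (fun w => pvCore (ws.erase w) (some w) (p ++ [w]))).flatten) ≠ [] := by
        intro habs
        have := List.flatten_eq_nil_iff.mp habs
          (pvCore (ws.erase w0) (some w0) (p ++ [w0]))
          (by rw [hcons]; simp)
        have hw0 : w0 ∈ pvCands ws cur := by rw [hcons]; simp
        have hm : pvMatch w0 cur = true := by
          rw [hcands] at hw0
          exact (List.mem_filter.mp hw0).2
        have hne0 : w0 ≠ "" := pvMatch_ne_empty hm
        have ht0 : pvTruthy (some w0) = true := by
          simp [pvTruthy]; exact hne0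
        exact core_ne_nil ht0 this
      have hLf : (((pvCands ws cur).map
          (fun w => pvCore (ws.erase w) (some w) (p ++ [w]))).flatten).isEmpty = false :=
        eq_false_of_ne_true (fun h => hflat_ne (List.isEmpty_iff.mp h))
      have hcf : (pvCands ws cur).isEmpty = false := eq_false_of_ne_true hc
      simp only [hLf, hcf, Bool.false_eq_true, if_false]
  · have ht' : pvTruthy cur = false := eq_false_of_ne_true ht
    rw [pvCore]
    simp only [ht', Bool.not_false, Bool.true_or, Bool.and_false, Bool.false_eq_true,
      if_false, if_true]
    have hcands : pvCands ws cur = ws := by simp [pvCands, ht']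
    rw [hcands]
    rw [attach_map_eq ws
        (fun w => pvCore (ws.erase w) (some w) (if pvTruthy (some w) then p ++ [w] else p))]
    apply congrArg List.flatten
    apply List.map_congr_left
    intro w hw
    by_cases hwe : w = ""
    · subst hwe
      have hg' := hg hw
      have hte : pvTruthy (some "") = false := by simp [pvTruthy]
      rw [hte]
      simp only [if_false, Bool.false_eq_true]
      have h1 : pvCore (ws.erase "") (some "") p = [] := by
        apply core_all_empty (ws.erase "").length _ (Nat.le_refl _)
        · intro x hx; exact hg'.2 _ (List.mem_of_mem_erase hx)
        · exact hte
      have h2 : pvCore (ws.erase "") (some "") (p ++ [""]) = [] := by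
        apply core_all_empty (ws.erase "").length _ (Nat.le_refl _)
        · intro x hx; exact hg'.2 _ (List.mem_of_mem_erase hx)
        · exact hte
      rw [h1, h2]
    · have : pvTruthy (some w) = true := by simp [pvTruthy]; exact hwe
      rw [this]
      simp

theorem good_child {ws : List String} {cur : Option String} {w : String}
    (hg : pvGood ws cur) (hw : w ∈ pvCands ws cur) : pvGood (ws.erase w) (some w) := by
  intro hmem
  have hmem' : "" ∈ ws := List.mem_of_mem_erase hmem
  have h := hg hmem'
  have hw' : w = "" := h.2 _ (pvCands_mem hw)
  subst hw'
  refine ⟨by simp [pvTruthy], ?_⟩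
  intro x hx
  exact h.2 _ (List.mem_of_mem_erase hx)

theorem altRun_eq :
    ∀ (stack : List (List String × Option String × List String)) (results : List (List String)),
      (∀ f ∈ stack, pvGood f.1 f.2.1) →
      pvAltRun stack results
        = results ++ (stack.map (fun f => pvCore f.1 f.2.1 f.2.2)).flatten := by
  intro stack results hg
  induction stack, results using pvAltRun.induct with
  | case1 results => simp [pvAltRun]
  | case2 results ws cur p rest hleaf ih =>
    have hgf : pvGood ws cur := hg (ws, cur, p) (List.mem_cons_self ..)
    rw [pvAltRun]
    simp only [hleaf, if_true]
    rw [ih (fun f hf => hg _ (List.mem_cons_of_mem _ hf))]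
    rw [List.map_cons, List.flatten_cons, core_step hgf]
    simp [hleaf, List.append_assoc]
  | case3 results ws cur p rest hleaf ih =>
    have hgf : pvGood ws cur := hg (ws, cur, p) (List.mem_cons_self ..)
    have hleaf' := eq_false_of_ne_true hleaf
    rw [pvAltRun]
    simp only [hleaf', Bool.false_eq_true, if_false]
    rw [ih]
    · rw [List.map_append, List.flatten_append, List.map_map,
        List.map_cons, List.flatten_cons, core_step hgf]
      simp only [hleaf', Bool.false_eq_true, if_false]
      rfl
    · intro f hf
      rcases List.mem_append.mp hf with hf | hf
      · obtain ⟨w, hw, rfl⟩ := List.mem_map.mp hf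
        exact good_child hgf hw
      · exact hg _ (List.mem_cons_of_mem _ hf)

-- ===== VERDICT (by name: the statement is the Claim_ definition above) =====
theorem search_all_paths_spec : Claim_equal_search_all_paths := by
  intro words cur path _ hpre
  unfold Spec_search_all_paths
  have hgood : pvGood words cur := by
    intro hmem
    unfold Pre_search_all_paths at hpre
    constructor
    · cases h : pvTruthy cur
      · rfl
      · exact absurd ⟨hmem, Or.inl h⟩ hpre
    · intro w hw
      by_contra hne
      exact hpre ⟨hmem, Or.inr ⟨w, hw, hne⟩⟩
  rw [search_eq_core words.length words (Nat.le_refl _) cur path]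
  have halt : search_all_paths_alt words cur path
      = pvAltRun [(words, cur, pvBase cur path)] [] := rfl
  rw [halt, altRun_eq [(words, cur, pvBase cur path)] [] (by
    intro f hf
    simp at hf
    subst hf
    exact hgood)]
  simp
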